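-- pv_equiv track=rewrite | github.com/zh3nl/Interesting-Problems | CodeSignal/Python/String Character Selection/Special Order Selection/solution.py | special_order
-- ===== SOURCE A (Python) =====
-- def special_order(inputString):
--     # TODO: Implement function
--     result = ''
--     length = len(inputString)
--     mid = length // 2 + length % 2
--
--     for i in range(mid):
--         result += inputString[length - 1 - i]
--
--     for i in range(mid):
--         if i != length - 1 - i:
--             result += inputString[i]
--
--     return result
-- ===== SOURCE B (Python) =====
-- def special_order(inputString):
--     c = len(inputString) // 2
--     return inputString[c:][::-1] + inputString[:c]
-- ===== Notes on version B (the rewrite author's own statement) =====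
-- stated objective: simpler
-- what changed: Replaced the two index-counting loops and the parity center-skip guard with a closed-form slice expression: reversed back half s[c:][::-1] concatenated with the front half s[:c], c = len//2.
import Mathlib
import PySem

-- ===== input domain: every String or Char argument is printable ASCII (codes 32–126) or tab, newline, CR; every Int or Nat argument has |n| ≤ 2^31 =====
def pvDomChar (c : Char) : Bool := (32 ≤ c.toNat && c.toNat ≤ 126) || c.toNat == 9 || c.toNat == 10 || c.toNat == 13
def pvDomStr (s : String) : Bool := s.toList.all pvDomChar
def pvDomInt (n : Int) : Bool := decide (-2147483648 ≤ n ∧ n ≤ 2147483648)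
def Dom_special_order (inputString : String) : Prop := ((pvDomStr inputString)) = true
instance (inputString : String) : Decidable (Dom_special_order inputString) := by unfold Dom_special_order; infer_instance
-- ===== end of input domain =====

-- B replaces A's two index-counting loops (and the parity center-skip guard) with a
-- closed-form slice expression: reversed back half + front half; objective: simpler.


-- ===== PORT A =====
-- literal transliteration of A: two counting loops over range(mid), string indexing via pyGetD
def special_order (inputString : String) : String :=
  let cs := inputString.toList
  let length : Int := cs.length
  let mid : Int := PySem.Int.floordiv length 2 + PySem.Int.mod length 2
  let r1 := (PySem.List.pyRange 0 mid 1).foldl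
    (fun acc i => acc ++ [PySem.List.pyGetD cs (length - 1 - i) ' ']) []
  let r2 := (PySem.List.pyRange 0 mid 1).foldl
    (fun acc i => if i ≠ length - 1 - i then acc ++ [PySem.List.pyGetD cs i ' '] else acc) r1
  String.ofList r2

-- ===== PORT B =====
-- literal transliteration of B: inputString[c:][::-1] + inputString[:c] with c = len // 2
def special_order_alt (inputString : String) : String :=
  let cs := inputString.toList
  let c : Int := PySem.Int.floordiv cs.length 2
  let back := PySem.List.slice cs (some c) none
  let backRev := (PySem.List.slice? back none none (-1)).getD []
  String.ofList (backRev ++ PySem.List.slice cs none (some c))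

-- ===== PRECONDITION & SPEC =====
def Spec_special_order (inputString : String) (out : String) : Prop := out = special_order_alt inputString
instance (inputString : String) (out : String) : Decidable (Spec_special_order inputString out) := by unfold Spec_special_order; infer_instance

-- ===== CLAIM (what is proved, stated in full; the proofs are below) =====
def Claim_equal_special_order : Prop := ∀ (inputString : String), Dom_special_order inputString → Spec_special_order inputString (special_order inputString)

-- ===== LEMMAS AND PROOFS =====

-- A's first loop builds the reversed back half of the character list.
theorem special_order_loop1 (cs : List Char) :
    (PySem.List.pyRange 0 ((cs.length / 2 + cs.length % 2 : Nat) : Int) 1).foldl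
      (fun acc i => acc ++ [PySem.List.pyGetD cs ((cs.length : Int) - 1 - i) ' ']) []
    = (cs.drop (cs.length / 2)).reverse := by
  rw [PySem.List.foldl_append_singleton_eq_map]
  apply List.ext_getElem
  · simp [PySem.List.length_pyRange_one]; omega
  · intro k h1 h2
    have hn : cs.length / 2 * 2 + cs.length % 2 = cs.length := Nat.div_add_mod' _ _
    have hk : k < cs.length / 2 + cs.length % 2 := by
      simp [PySem.List.length_pyRange_one] at h1
      omega
    simp only [List.nil_append, List.getElem_map, PySem.List.getElem_pyRange_one,
      List.getElem_reverse, List.getElem_drop]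
    rw [PySem.List.pyGetD_eq_getElem cs ' ' (by omega) (by omega)]
    congr 1
    simp only [List.length_drop] at h2 ⊢
    omega

-- indexing cs[i] over range(c) yields the first c characters
theorem special_order_takeMap (cs : List Char) (c : Nat) (hc : c ≤ cs.length) :
    (PySem.List.pyRange 0 (c : Int) 1).map (fun i => PySem.List.pyGetD cs i ' ')
    = cs.take c := by
  apply List.ext_getElem
  · simp [PySem.List.length_pyRange_one]; omega
  · intro k h1 h2
    have hk : k < c := by simpa [PySem.List.length_pyRange_one] using h1
    simp only [List.getElem_map, PySem.List.getElem_pyRange_one, List.getElem_take]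
    rw [PySem.List.pyGetD_eq_getElem cs ' ' (by omega) (by omega)]
    congr 1
    omega

-- A's second loop (with the center-skip guard) appends exactly the front half.
theorem special_order_loop2 (cs : List Char) (init : List Char) :
    (PySem.List.pyRange 0 ((cs.length / 2 + cs.length % 2 : Nat) : Int) 1).foldl
      (fun acc i => if i ≠ (cs.length : Int) - 1 - i then acc ++ [PySem.List.pyGetD cs i ' '] else acc) init
    = init ++ cs.take (cs.length / 2) := by
  have hn : cs.length / 2 * 2 + cs.length % 2 = cs.length := Nat.div_add_mod' _ _
  have hguard : ∀ (acc : List Char), ∀ i ∈ PySem.List.pyRange 0 ((cs.length / 2 : Nat) : Int) 1,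
      (if i ≠ (cs.length : Int) - 1 - i then acc ++ [PySem.List.pyGetD cs i ' '] else acc)
      = acc ++ [PySem.List.pyGetD cs i ' '] := by
    intro acc i hi
    rw [PySem.List.mem_pyRange_one] at hi
    rw [if_pos]
    push_cast at hi
    omega
  rcases Nat.even_or_odd cs.length with he | ho
  · have h2 : cs.length % 2 = 0 := Nat.even_iff.mp he
    rw [h2]
    simp only [Nat.add_zero]
    rw [PySem.List.foldl_congr_mem _ _ _ init hguard, PySem.List.foldl_append_singleton_eq_map,
      special_order_takeMap cs _ (Nat.div_le_self _ _)]
  · have h2 : cs.length % 2 = 1 := Nat.odd_iff.mp ho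
    rw [h2]
    have hsplit : ((cs.length / 2 + 1 : Nat) : Int) = ((cs.length / 2 : Nat) : Int) + 1 := by
      push_cast; ring
    rw [hsplit, PySem.List.pyRange_one_succ_right (by positivity)]
    rw [List.foldl_append]
    rw [PySem.List.foldl_congr_mem _ _ _ init hguard, PySem.List.foldl_append_singleton_eq_map,
      special_order_takeMap cs _ (Nat.div_le_self _ _)]
    simp only [List.foldl_cons, List.foldl_nil]
    rw [if_neg]
    push_cast
    omega

-- ===== VERDICT (by name: the statement is the Claim_ definition above) =====
theorem special_order_spec : Claim_equal_special_order := by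
  intro s _
  unfold Spec_special_order special_order special_order_alt
  have hfd : PySem.Int.floordiv (s.toList.length : Int) 2 = ((s.toList.length / 2 : Nat) : Int) := by
    exact_mod_cast PySem.Int.floordiv_natCast s.toList.length 2
  have hmd : PySem.Int.mod (s.toList.length : Int) 2 = ((s.toList.length % 2 : Nat) : Int) := by
    exact_mod_cast PySem.Int.mod_natCast s.toList.length 2
  simp only [hfd, hmd, PySem.List.slice?_none_none_neg_one, Option.getD_some,
    PySem.List.slice_from_natCast, PySem.List.slice_to_natCast]
  rw [← Nat.cast_add, special_order_loop1, special_order_loop2]
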